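-- pv_equiv track=rewrite | github.com/Vladimir-Moskov/PythonInterview | HackerRank/Hack_Interview_V_US.py | maxXorValue
-- ===== SOURCE A (Python) =====
-- def maxXorValue(x, k):
--     result = ["0"] * len(x)
--
--     for i, val in enumerate(x):
--         if k == 0:
--             break
--         if val == "0":
--             result[i] = "1"
--             k -= 1
--
--     result = "".join(result)
--     return result
-- ===== SOURCE B (Python) =====
-- def maxXorValue(x, k):
--     pieces = []
--     pos = 0
--     while k:
--         j = x.find("0", pos)
--         if j < 0:
--             break
--         pieces.append("0" * (j - pos) + "1")
--         pos = j + 1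
--         k -= 1
--     return "".join(pieces) + "0" * (len(x) - pos)
-- ===== Notes on version B (the rewrite author's own statement) =====
-- stated objective: faster
-- what changed: B jumps from one '0' to the next with str.find and assembles the output by concatenating gap segments ('0'*gap + '1') plus a tail pad, instead of A's per-character Python loop that mutates a preallocated buffer with a countdown break.
import Mathlib
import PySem

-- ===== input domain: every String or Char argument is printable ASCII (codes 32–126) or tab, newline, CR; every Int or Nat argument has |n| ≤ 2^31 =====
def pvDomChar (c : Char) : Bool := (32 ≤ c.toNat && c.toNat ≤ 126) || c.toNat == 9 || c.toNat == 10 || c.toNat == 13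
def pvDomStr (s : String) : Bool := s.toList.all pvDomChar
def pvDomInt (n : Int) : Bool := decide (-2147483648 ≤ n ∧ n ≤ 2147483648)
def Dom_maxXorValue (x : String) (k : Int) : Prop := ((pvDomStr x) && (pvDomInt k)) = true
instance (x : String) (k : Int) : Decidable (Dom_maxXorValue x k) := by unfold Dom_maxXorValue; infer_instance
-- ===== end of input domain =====

-- B jumps from one '0' to the next with str.find and concatenates gap segments plus a tail
-- pad, instead of A's per-character scan over a preallocated buffer (alternative algorithm).

-- ===== PORT A =====
-- the for-loop over enumerate(x) with the 'if k == 0: break' at the top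
def pvLoopA (pairs : List (Int × Char)) (res : List String) (k : Int) : List String :=
  match pairs with
  | [] => res
  | (i, v) :: rest =>
    if k == 0 then res
    else if v == '0' then
      -- result[i] = "1": i comes from enumerate, so 0 ≤ i < len(result); .toNat is exact here
      pvLoopA rest (res.set i.toNat "1") (k - 1)
    else pvLoopA rest res k

def maxXorValue (x : String) (k : Int) : String :=
  let result := List.replicate x.toList.length "0"   -- ["0"] * len(x)
  let result := pvLoopA (PySem.List.enumerate x.toList) result k
  PySem.Str.join "" result

-- ===== PORT B =====
-- the 'while k:' loop of Source B over state (pieces, pos, k); the fuel only makes the recursion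
-- structural (len+1 is never exhausted: each iteration consumes one '0' of x)
def pvLoopB (cs : List Char) (fuel : Nat) (pieces : List (List Char)) (pos : Int) (k : Int) :
    List (List Char) × Int :=
  match fuel with
  | 0 => (pieces, pos)
  | fuel + 1 =>
    if k == 0 then (pieces, pos)
    else
      let j := PySem.Chars.findFrom cs ['0'] pos none   -- x.find("0", pos)
      if j < 0 then (pieces, pos)
      else pvLoopB cs fuel (pieces ++ [PySem.List.pyRepeat ['0'] (j - pos) ++ ['1']]) (j + 1) (k - 1)

def maxXorValue_alt (x : String) (k : Int) : String :=
  let cs := x.toList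
  let r := pvLoopB cs (cs.length + 1) [] 0 k
  -- "".join(pieces) + "0" * (len(x) - pos)
  String.ofList (PySem.Chars.join [] r.1 ++ PySem.List.pyRepeat ['0'] ((cs.length : Int) - r.2))

-- ===== PRECONDITION & SPEC =====
def Spec_maxXorValue (x : String) (k : Int) (out : String) : Prop := out = maxXorValue_alt x k
instance (x : String) (k : Int) (out : String) : Decidable (Spec_maxXorValue x k out) := by unfold Spec_maxXorValue; infer_instance

-- ===== CLAIM (what is proved, stated in full; the proofs are below) =====
def Claim_equal_maxXorValue : Prop := ∀ (x : String) (k : Int), Dom_maxXorValue x k → Spec_maxXorValue x k (maxXorValue x k)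

-- ===== LEMMAS AND PROOFS =====

-- common characterisation: the output characters of both programs
def pvSpec (cs : List Char) (k : Int) : List Char :=
  match cs with
  | [] => []
  | c :: rest =>
    if k = 0 then List.replicate (c :: rest).length '0'
    else if c = '0' then '1' :: pvSpec rest (k - 1)
    else '0' :: pvSpec rest k

lemma pvSpec_zero (cs : List Char) : pvSpec cs 0 = List.replicate cs.length '0' := by
  cases cs <;> simp [pvSpec]

lemma pvSpec_no_zero (cs : List Char) (k : Int) (h : '0' ∉ cs) :
    pvSpec cs k = List.replicate cs.length '0' := by
  induction cs generalizing k with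
  | nil => rfl
  | cons c rest ih =>
    rw [pvSpec]
    by_cases hk : k = 0
    · simp [hk]
    · have hc : c ≠ '0' := fun e => h (e ▸ List.mem_cons_self)
      rw [if_neg hk, if_neg hc, ih k (fun m => h (List.mem_cons_of_mem _ m))]
      simp [List.replicate_succ]

lemma pvSpec_split (fn : Nat) (l : List Char) (k : Int) (hk : k ≠ 0)
    (hlt : fn < l.length) (h0 : l[fn] = '0')
    (hpre : ∀ i, (hi : i < fn) → l[i]'(by omega) ≠ '0') :
    pvSpec l k = List.replicate fn '0' ++ '1' :: pvSpec (l.drop (fn + 1)) (k - 1) := by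
  induction fn generalizing l k with
  | zero =>
    cases l with
    | nil => simp at hlt
    | cons c rest => simp at h0; subst h0; simp [pvSpec, hk]
  | succ n ih =>
    cases l with
    | nil => simp at hlt
    | cons c rest =>
      have hc : c ≠ '0' := by have := hpre 0 (Nat.succ_pos n); simpa using this
      rw [pvSpec, if_neg hk, if_neg hc]
      rw [ih rest k hk (by simpa using hlt) (by simpa using h0)
        (fun i hi => by have := hpre (i + 1) (by omega); simpa using this)]
      simp [List.replicate_succ]

-- ===== A-side: the buffer loop produces pvSpec =====

lemma pvLoopA_spec (cs : List Char) :
    ∀ (k : Int) (pre : List String),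
    pvLoopA (PySem.List.enumerate cs (pre.length : Int)) (pre ++ List.replicate cs.length "0") k
      = pre ++ (pvSpec cs k).map (fun c => String.ofList [c]) := by
  induction cs with
  | nil => intro k pre; simp [PySem.List.enumerate_nil, pvLoopA, pvSpec]
  | cons c rest ih =>
    intro k pre
    rw [PySem.List.enumerate_cons]
    by_cases hk : k = 0
    · subst hk
      rw [pvLoopA, if_pos (by rfl), pvSpec_zero, List.map_replicate]
    · have hkb : ¬ ((k == 0) = true) := by simp [hk]
      by_cases hc : c = '0'
      · subst hc
        rw [pvLoopA, if_neg hkb, if_pos (by rfl)]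
        have hset : (pre ++ List.replicate (('0' :: rest).length) "0").set
            ((pre.length : Int)).toNat "1" = (pre ++ ["1"]) ++ List.replicate rest.length "0" := by
          rw [Int.toNat_natCast, List.length_cons, List.replicate_succ,
            List.set_append_right _ _ le_rfl]
          simp
        rw [hset]
        have hlen : ((pre.length : Int) + 1) = (((pre ++ ["1"]).length : Nat) : Int) := by
          simp
        rw [hlen, ih (k - 1) (pre ++ ["1"])]
        rw [pvSpec, if_neg hk, if_pos rfl, List.map_cons, List.append_assoc]
        rfl
      · rw [pvLoopA, if_neg hkb, if_neg (by simpa using hc)]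
        have hbuf : pre ++ List.replicate (c :: rest).length "0"
            = (pre ++ ["0"]) ++ List.replicate rest.length "0" := by
          simp [List.replicate_succ]
        rw [hbuf]
        have hlen : ((pre.length : Int) + 1) = (((pre ++ ["0"]).length : Nat) : Int) := by
          simp
        rw [hlen, ih k (pre ++ ["0"])]
        rw [pvSpec, if_neg hk, if_neg hc, List.map_cons, List.append_assoc]
        rfl

-- ===== B-side: the find-jumping loop produces pvSpec =====

lemma pvJoinNil (as : List (List Char)) : PySem.Chars.join [] as = as.flatten := by
  induction as with
  | nil => simp [PySem.Chars.join, List.intercalate]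
  | cons a as ih =>
    cases as with
    | nil => simp [PySem.Chars.join, List.intercalate]
    | cons b bs => rw [PySem.Chars.join_cons_cons]; simp_all

lemma pvLoopB_spec (cs : List Char) :
    ∀ (fuel : Nat) (p : Nat) (k : Int) (pieces : List (List Char)),
    p ≤ cs.length → cs.length - p < fuel →
    (PySem.Chars.join [] (pvLoopB cs fuel pieces (p : Int) k).1 ++
        PySem.List.pyRepeat ['0'] ((cs.length : Int) - (pvLoopB cs fuel pieces (p : Int) k).2))
      = PySem.Chars.join [] pieces ++ pvSpec (cs.drop p) k := by
  intro fuel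
  induction fuel with
  | zero => intro p k pieces _ h; omega
  | succ fuel ih =>
    intro p k pieces hp hf
    have hpad : PySem.List.pyRepeat ['0'] ((cs.length : Int) - (p : Int))
        = List.replicate (cs.length - p) '0' := by
      rw [show ((cs.length : Int) - (p : Int)) = ((cs.length - p : Nat) : Int) by omega,
        PySem.List.pyRepeat_singleton, Int.toNat_natCast]
    by_cases hk : k = 0
    · subst hk
      simp only [pvLoopB, if_pos (show ((0:Int) == 0) = true by rfl)]
      rw [hpad, pvSpec_zero, List.length_drop]
    · have hkb : ¬ ((k == 0) = true) := by simp [hk]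
      simp only [pvLoopB, if_neg hkb]
      rw [PySem.Chars.findFrom_natCast cs ['0'] p hp]
      by_cases hfind : PySem.Chars.find (cs.drop p) ['0'] = -1
      · rw [if_pos hfind, if_pos (show (-1 : Int) < 0 by norm_num)]
        have hno : '0' ∉ cs.drop p := by
          rw [PySem.Chars.find_eq_neg_one_iff] at hfind
          intro hm
          obtain ⟨s, t, e⟩ := List.append_of_mem hm
          exact hfind ⟨s, t, by simp [e]⟩
        rw [hpad, pvSpec_no_zero _ _ hno, List.length_drop]
      · have hnn : 0 ≤ PySem.Chars.find (cs.drop p) ['0'] := by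
          have := PySem.Chars.neg_one_le_find (cs.drop p) ['0']
          omega
        rw [if_neg hfind]
        obtain ⟨hpref, hmin⟩ := PySem.Chars.find_spec hnn
        set fn := (PySem.Chars.find (cs.drop p) ['0']).toNat with hfn
        have hfcast : PySem.Chars.find (cs.drop p) ['0'] = (fn : Int) := by omega
        obtain ⟨t, ht⟩ := hpref
        have hlt : fn < (cs.drop p).length := by
          by_contra hge
          have hnil : (cs.drop p).drop fn = [] := List.drop_eq_nil_of_le (by omega)
          rw [← ht] at hnil
          simp at hnil
        have hlt' : fn < cs.length - p := by simpa using hlt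
        rw [hfcast, if_neg (by omega)]
        have hpiece : PySem.List.pyRepeat ['0'] ((p : Int) + (fn : Int) - (p : Int))
            = List.replicate fn '0' := by
          rw [show ((p : Int) + (fn : Int) - (p : Int)) = ((fn : Nat) : Int) by ring,
            PySem.List.pyRepeat_singleton, Int.toNat_natCast]
        have hpos : ((p : Int) + (fn : Int) + 1) = (((p + fn + 1 : Nat)) : Int) := by push_cast; ring
        rw [hpiece, hpos, ih (p + fn + 1) (k - 1) _ (by omega) (by omega)]
        rw [pvJoinNil, pvJoinNil, List.flatten_append, List.flatten_cons, List.flatten_nil,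
          List.append_nil, List.append_assoc]
        congr 1
        have h0 : (cs.drop p)[fn] = '0' := by
          have h1 : ((cs.drop p).drop fn)[0]? = some '0' := by rw [← ht]; rfl
          rw [List.getElem?_drop, List.getElem?_eq_some_iff] at h1
          obtain ⟨h2, h3⟩ := h1
          simpa using h3
        have hprez : ∀ i, (hi : i < fn) → (cs.drop p)[i]'(by omega) ≠ '0' := by
          intro i hi he
          apply hmin i hi
          rw [List.drop_eq_getElem_cons (by omega : i < (cs.drop p).length), he]
          exact ⟨(cs.drop p).drop (i + 1), rfl⟩
        rw [pvSpec_split fn (cs.drop p) k hk hlt h0 hprez, List.drop_drop,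
          show p + (fn + 1) = p + fn + 1 by omega]
        simp

lemma pvFlattenSingletons (l : List Char) : (List.map (fun c => [c]) l).flatten = l := by
  induction l with
  | nil => rfl
  | cons c rest ih => simp [ih]

-- ===== VERDICT (by name: the statement is the Claim_ definition above) =====
theorem maxXorValue_spec : Claim_equal_maxXorValue := by
  intro x k _
  show maxXorValue x k = maxXorValue_alt x k
  apply String.toList_inj.mp
  simp only [maxXorValue, maxXorValue_alt]
  have hA := pvLoopA_spec x.toList k []
  simp only [List.length_nil, Int.natCast_zero, List.nil_append] at hA
  rw [hA, String.toList_ofList]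
  have hB := pvLoopB_spec x.toList (x.toList.length + 1) 0 k [] (by omega) (by omega)
  simp only [Int.natCast_zero, List.drop_zero] at hB
  rw [hB, pvJoinNil]
  simp [pysem, pvJoinNil, List.map_map, Function.comp_def]
  exact pvFlattenSingletons _
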